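-- pv_equiv track=rewrite | github.com/Johennes/awesome-endino | awesome_endino/main.py | format_relation_types
-- ===== SOURCE A (Python) =====
-- def format_relation_types(relation_types_by_release_group_dict, relation_types_dict):
--     all_types = set()
--     if relation_types_by_release_group_dict:
--         all_types.update(relation_types_by_release_group_dict)
--     if relation_types_dict:
--         all_types.update(relation_types_dict)
--
--     fragments = []
--     for type in sorted(all_types):
--         if relation_types_by_release_group_dict and type in relation_types_by_release_group_dict:
--             fragments.append(type)
--         else:
--             count = relation_types_dict[type]
--             tracks = "tracks" if count > 1 else "track"
--             fragments.append(f"{type} ({count} {tracks})")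
--     return ", ".join(fragments)
-- ===== SOURCE B (Python) =====
-- def format_relation_types(relation_types_by_release_group_dict, relation_types_dict):
--     bare = sorted(relation_types_by_release_group_dict) if relation_types_by_release_group_dict else []
--     counted = sorted(relation_types_dict.items(), key=lambda p: p[0]) if relation_types_dict else []
--     fragments = []
--     i = j = 0
--     while i < len(bare) or j < len(counted):
--         if j >= len(counted) or (i < len(bare) and bare[i] <= counted[j][0]):
--             t = bare[i]
--             fragments.append(t)
--             if j < len(counted) and counted[j][0] == t:
--                 j += 1
--             i += 1
--         else:
--             t, c = counted[j]
--             fragments.append(f"{t} ({c} {'tracks' if c > 1 else 'track'})")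
--             j += 1
--     return ", ".join(fragments)
-- ===== Notes on version B (the rewrite author's own statement) =====
-- stated objective: alternative
-- what changed: Instead of sorting the union of keys and branching per element with a dict lookup inside the loop, B sorts the two key streams separately (bare release-group names, counted items) and merges them with a two-pointer loop, giving bare names precedence on equal keys; no membership test or count lookup remains in the output pass.
import Mathlib
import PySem

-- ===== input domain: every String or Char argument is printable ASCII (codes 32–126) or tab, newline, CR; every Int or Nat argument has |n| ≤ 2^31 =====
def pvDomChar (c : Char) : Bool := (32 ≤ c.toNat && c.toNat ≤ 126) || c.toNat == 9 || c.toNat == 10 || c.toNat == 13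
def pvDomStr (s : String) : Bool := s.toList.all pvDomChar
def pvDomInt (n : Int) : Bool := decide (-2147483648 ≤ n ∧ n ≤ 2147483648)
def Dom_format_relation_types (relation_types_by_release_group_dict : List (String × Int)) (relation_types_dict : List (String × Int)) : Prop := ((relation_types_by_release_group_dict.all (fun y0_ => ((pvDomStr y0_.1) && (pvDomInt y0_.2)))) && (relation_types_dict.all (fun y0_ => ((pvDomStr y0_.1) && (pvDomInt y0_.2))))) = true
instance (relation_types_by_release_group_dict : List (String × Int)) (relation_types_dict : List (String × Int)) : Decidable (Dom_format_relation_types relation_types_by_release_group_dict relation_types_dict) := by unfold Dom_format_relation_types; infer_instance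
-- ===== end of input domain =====

-- B replaces A's sort-the-union-then-branch pass by a different algorithm: it sorts the two key
-- streams separately and MERGES them with a two-pointer loop (bare names win ties); objective: alternative.
-- Both dict parameters are modelled as association lists turned into Python dicts
-- (PySem.Dict.ofList: last value wins, first position kept), exactly dict(pairs).

-- ===== PORT A =====
-- the f-string f"{type} ({count} {tracks})" (appears verbatim in both Pythons)
def fmtFrag (t : String) (c : Int) : String :=
  PySem.Str.join "" [t, " (", PySem.Int.toStr c, " ", if c > 1 then "tracks" else "track", ")"]

def format_relation_types (relation_types_by_release_group_dict : List (String × Int)) (relation_types_dict : List (String × Int)) : String :=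
  let gd : PySem.Dict String Int := PySem.Dict.ofList relation_types_by_release_group_dict
  let dd : PySem.Dict String Int := PySem.Dict.ofList relation_types_dict
  let allTypes : PySem.Set String := PySem.Set.empty
  let allTypes := if relation_types_by_release_group_dict.isEmpty then allTypes
                  else PySem.Set.update allTypes gd.keys
  let allTypes := if relation_types_dict.isEmpty then allTypes
                  else PySem.Set.update allTypes dd.keys
  let fragments : List String :=
    (PySem.List.sorted allTypes (fun x => x) false).foldl (fun acc t =>
      if ¬ relation_types_by_release_group_dict.isEmpty ∧ gd.contains t then
        acc ++ [t]
      else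
        -- relation_types_dict[type]: every type reaching this branch is a key of dd
        -- (it is not in gd, and allTypes is the union), so Python's KeyError is unreachable and getD is exact
        acc ++ [fmtFrag t (dd.getD t 0)]) []
  PySem.Str.join ", " fragments

-- ===== PORT B =====
-- the while loop over indices i, j: each iteration consumes the head of `bare` and/or of `counted`
def mergeFrags : List String → List (String × Int) → List String
  | [], [] => []
  | t :: bs, [] => t :: mergeFrags bs []
  | [], (u, c) :: cs => fmtFrag u c :: mergeFrags [] cs
  | t :: bs, (u, c) :: cs =>
    if t ≤ u then
      t :: mergeFrags bs (if u = t then cs else (u, c) :: cs)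
    else
      fmtFrag u c :: mergeFrags (t :: bs) cs
termination_by bare counted => bare.length + counted.length
decreasing_by
  · simp
  · simp
  · split <;> simp <;> omega
  · simp

def format_relation_types_alt (relation_types_by_release_group_dict : List (String × Int)) (relation_types_dict : List (String × Int)) : String :=
  let gd : PySem.Dict String Int := PySem.Dict.ofList relation_types_by_release_group_dict
  let dd : PySem.Dict String Int := PySem.Dict.ofList relation_types_dict
  let bare : List String := if relation_types_by_release_group_dict.isEmpty then []
                            else PySem.List.sorted gd.keys (fun x => x) false
  let counted : List (String × Int) := if relation_types_dict.isEmpty then []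
                                       else PySem.List.sorted dd.items (fun p => p.1) false
  PySem.Str.join ", " (mergeFrags bare counted)

-- ===== PRECONDITION & SPEC =====
def Spec_format_relation_types (relation_types_by_release_group_dict : List (String × Int)) (relation_types_dict : List (String × Int)) (out : String) : Prop := out = format_relation_types_alt relation_types_by_release_group_dict relation_types_dict
instance (relation_types_by_release_group_dict : List (String × Int)) (relation_types_dict : List (String × Int)) (out : String) : Decidable (Spec_format_relation_types relation_types_by_release_group_dict relation_types_dict out) := by unfold Spec_format_relation_types; infer_instance

-- ===== CLAIM (what is proved, stated in full; the proofs are below) =====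
def Claim_equal_format_relation_types : Prop := ∀ (relation_types_by_release_group_dict : List (String × Int)) (relation_types_dict : List (String × Int)), Dom_format_relation_types relation_types_by_release_group_dict relation_types_dict → Spec_format_relation_types relation_types_by_release_group_dict relation_types_dict (format_relation_types relation_types_by_release_group_dict relation_types_dict)

-- ===== LEMMAS AND PROOFS =====

-- proof-only helper: the sorted merge (set union) of the two key lists, branching exactly like mergeFrags
def U : List String → List String → List String
  | [], [] => []
  | t :: bs, [] => t :: U bs []
  | [], u :: cs => u :: U [] cs
  | t :: bs, u :: cs =>
    if t ≤ u then
      t :: U bs (if u = t then cs else u :: cs)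
    else
      u :: U (t :: bs) cs
termination_by a b => a.length + b.length
decreasing_by
  · simp
  · simp
  · split <;> simp <;> omega
  · simp

theorem U_nil_nil : U [] [] = [] := by rw [U]
theorem U_nil_cons (u : String) (cs : List String) : U [] (u :: cs) = u :: U [] cs := by rw [U]
theorem U_cons_nil (t : String) (bs : List String) : U (t :: bs) [] = t :: U bs [] := by rw [U]
theorem U_cons_cons (t u : String) (bs cs : List String) :
    U (t :: bs) (u :: cs)
      = if t ≤ u then t :: U bs (if u = t then cs else u :: cs) else u :: U (t :: bs) cs := by
  rw [U]

theorem mem_U (a : List String) (b : List String) (x : String) :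
    x ∈ U a b ↔ x ∈ a ∨ x ∈ b := by
  fun_induction U a b with
  | case1 => simp
  | case2 t bs ih => simp [ih]
  | case3 u cs ih => simp [ih]
  | case4 t bs u cs hle ih =>
    by_cases h : u = t <;> simp [h] at ih ⊢ <;> tauto
  | case5 t bs u cs hle ih =>
    simp [ih]; tauto

theorem pairwise_U (a : List String) (b : List String)
    (ha : a.Pairwise (· < ·)) (hb : b.Pairwise (· < ·)) : (U a b).Pairwise (· < ·) := by
  fun_induction U a b with
  | case1 => simp
  | case2 t bs ih =>
    rw [List.pairwise_cons] at ha ⊢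
    exact ⟨fun x hx => ha.1 x (by simpa [mem_U] using hx), ih ha.2 hb⟩
  | case3 u cs ih =>
    rw [List.pairwise_cons] at hb ⊢
    exact ⟨fun x hx => hb.1 x (by simpa [mem_U] using hx), ih ha hb.2⟩
  | case4 t bs u cs hle ih =>
    rw [List.pairwise_cons] at ha hb
    by_cases h : u = t
    · subst h
      rw [dif_pos rfl] at ih
      rw [if_pos rfl, List.pairwise_cons]
      refine ⟨fun x hx => ?_, ih ha.2 hb.2⟩
      rcases (mem_U _ _ _).mp hx with hm | hm
      · exact ha.1 x hm
      · exact hb.1 x hm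
    · rw [dif_neg h] at ih
      rw [if_neg h, List.pairwise_cons]
      have htu : t < u := lt_of_le_of_ne hle (fun e => h e.symm)
      refine ⟨fun x hx => ?_, ih ha.2 (List.pairwise_cons.mpr hb)⟩
      rcases (mem_U _ _ _).mp hx with hm | hm
      · exact ha.1 x hm
      · rcases List.mem_cons.mp hm with hm | hm
        · rw [hm]; exact htu
        · exact htu.trans (hb.1 x hm)
  | case5 t bs u cs hle ih =>
    rw [List.pairwise_cons] at ha hb
    have hut : u < t := lt_of_not_ge (fun hge => hle hge)
    rw [List.pairwise_cons]
    refine ⟨fun x hx => ?_, ih (List.pairwise_cons.mpr ha) hb.2⟩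
    rcases (mem_U _ _ _).mp hx with hm | hm
    · rcases List.mem_cons.mp hm with hm | hm
      · rw [hm]; exact hut
      · exact hut.trans (ha.1 x hm)
    · exact hb.1 x hm

-- the two-pointer merge IS the map of a rendering function over the merged key list
theorem merge_eq_map (f : String → String) (bare : List String) (counted : List (String × Int))
    (ha : bare.Pairwise (· < ·)) (hb : (counted.map Prod.fst).Pairwise (· < ·))
    (hf1 : ∀ t ∈ bare, f t = t)
    (hf2 : ∀ p ∈ counted, p.1 ∉ bare → f p.1 = fmtFrag p.1 p.2) :
    mergeFrags bare counted = (U bare (counted.map Prod.fst)).map f := by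
  fun_induction mergeFrags bare counted with
  | case1 => simp [U_nil_nil]
  | case2 t bs ih =>
    simp only [List.map_nil] at ih ⊢
    rw [List.pairwise_cons] at ha
    rw [U_cons_nil, List.map_cons, hf1 t List.mem_cons_self,
      ih ha.2 (by simp) (fun x hx => hf1 x (List.mem_cons_of_mem _ hx)) (by simp)]
  | case3 u c cs ih =>
    simp only [List.map_cons] at ih hb ⊢
    rw [List.pairwise_cons] at hb
    rw [U_nil_cons, List.map_cons, hf2 (u, c) List.mem_cons_self (by simp),
      ih (by simp) hb.2 (by simp) (fun p hp _ => hf2 p (List.mem_cons_of_mem _ hp) (by simp))]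
  | case4 t bs u c cs hle ih =>
    simp only [List.map_cons] at hb ⊢
    rw [List.pairwise_cons] at ha hb
    rw [U_cons_cons, if_pos hle, List.map_cons, hf1 t List.mem_cons_self]
    by_cases h : u = t
    · rw [dif_pos h] at ih
      rw [if_pos h,
        ih ha.2 hb.2 (fun x hx => hf1 x (List.mem_cons_of_mem _ hx))
          (fun p hp hpb => hf2 p (List.mem_cons_of_mem _ hp) (fun hm => by
            rcases List.mem_cons.mp hm with hm | hm
            · have hlt := hb.1 p.1 (List.mem_map_of_mem hp)
              rw [hm, h] at hlt
              exact lt_irrefl t hlt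
            · exact hpb hm))]
      rw [if_pos h]
    · rw [dif_neg h] at ih
      simp only [List.map_cons] at ih
      have htu : t < u := lt_of_le_of_ne hle (fun e => h e.symm)
      rw [if_neg h,
        ih ha.2 (List.pairwise_cons.mpr hb)
          (fun x hx => hf1 x (List.mem_cons_of_mem _ hx))
          (fun p hp hpb => hf2 p hp (fun hm => by
            rcases List.mem_cons.mp hm with hm | hm
            · rcases List.mem_cons.mp hp with hp' | hp'
              · exact h (by rw [hp'] at hm; exact hm)
              · have hlt := hb.1 p.1 (List.mem_map_of_mem hp')
                rw [hm] at hlt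
                exact lt_irrefl t (htu.trans hlt)
            · exact hpb hm))]
      rw [if_neg h]
  | case5 t bs u c cs hle ih =>
    simp only [List.map_cons] at ih hb ⊢
    rw [List.pairwise_cons] at ha hb
    have hut : u < t := lt_of_not_ge (fun hge => hle hge)
    rw [U_cons_cons, if_neg hle, List.map_cons,
      hf2 (u, c) List.mem_cons_self (fun hm => by
        rcases List.mem_cons.mp hm with hm | hm
        · exact lt_irrefl t ((show u = t from hm) ▸ hut)
        · exact lt_irrefl u (hut.trans (ha.1 u hm))),
      ih (List.pairwise_cons.mpr ha) hb.2 hf1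
        (fun p hp hpb => hf2 p (List.mem_cons_of_mem _ hp) hpb)]

-- dropping the (redundant) truthiness guards: the guarded step equals the unguarded one
theorem guard_update (l : List (String × Int)) (s : PySem.Set String) :
    (if l.isEmpty then s else PySem.Set.update s (PySem.Dict.ofList l).keys)
      = PySem.Set.update s (PySem.Dict.ofList l).keys := by
  cases l <;> rfl

theorem guard_sorted_keys (l : List (String × Int)) :
    (if l.isEmpty then ([] : List String)
     else PySem.List.sorted (PySem.Dict.ofList l).keys (fun x => x) false)
      = PySem.List.sorted (PySem.Dict.ofList l).keys (fun x => x) false := by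
  cases l <;> rfl

theorem guard_sorted_items (l : List (String × Int)) :
    (if l.isEmpty then ([] : List (String × Int))
     else PySem.List.sorted (PySem.Dict.ofList l).items (fun p => p.1) false)
      = PySem.List.sorted (PySem.Dict.ofList l).items (fun p => p.1) false := by
  cases l <;> rfl

-- A's accumulate-then-branch loop is a map (branch pushed into the element)
theorem foldl_append_ite {α β : Type} (c : α → Prop) [DecidablePred c] (f g : α → β)
    (l : List α) (acc : List β) :
    l.foldl (fun acc t => if c t then acc ++ [f t] else acc ++ [g t]) acc
      = acc ++ l.map (fun t => if c t then f t else g t) := by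
  induction l generalizing acc with
  | nil => simp
  | cons x xs ih =>
    simp only [List.foldl_cons, List.map_cons]
    by_cases hx : c x <;> simp [hx, ih]

-- a sorted-by-key list with pairwise-distinct keys is strictly increasing in the key
theorem pairwise_lt_of_le_nodup {α : Type} (l : List α) (key : α → String)
    (hle : l.Pairwise (fun a b => key a ≤ key b)) (hnd : (l.map key).Nodup) :
    (l.map key).Pairwise (· < ·) := by
  rw [List.pairwise_map]
  rw [List.nodup_iff_pairwise_ne, List.pairwise_map] at hnd
  exact (hle.and hnd).imp (fun h => lt_of_le_of_ne h.1 h.2)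

theorem format_A_eq_alt (g d : List (String × Int)) :
    format_relation_types g d = format_relation_types_alt g d := by
  simp only [format_relation_types, format_relation_types_alt,
    guard_update, guard_sorted_keys, guard_sorted_items]
  set gd : PySem.Dict String Int := PySem.Dict.ofList g with hgd
  set dd : PySem.Dict String Int := PySem.Dict.ofList d with hdd
  set bare : List String := PySem.List.sorted gd.keys (fun x => x) false with hbare
  set counted : List (String × Int) := PySem.List.sorted dd.items (fun p => p.1) false with hcounted
  -- basic order facts
  have hndg : gd.keys.Nodup := PySem.Dict.nodup_keys_ofList g
  have hndd : dd.keys.Nodup := PySem.Dict.nodup_keys_ofList d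
  have hbperm : bare.Perm gd.keys := PySem.List.sorted_perm gd.keys (fun x => x) false
  have hcperm : counted.Perm dd.items := PySem.List.sorted_perm dd.items (fun p => p.1) false
  have hckperm : (counted.map Prod.fst).Perm dd.keys := hcperm.map Prod.fst
  have hbP : bare.Pairwise (· < ·) := by
    have := pairwise_lt_of_le_nodup bare (fun x => x)
      (PySem.List.sorted_pairwise gd.keys (fun x => x)) (by rw [List.map_id']; exact hbperm.symm.nodup hndg)
    simpa using this
  have hcP : (counted.map Prod.fst).Pairwise (· < ·) :=
    pairwise_lt_of_le_nodup counted (fun p => p.1)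
      (PySem.List.sorted_pairwise dd.items (fun p => p.1)) (hckperm.symm.nodup hndd)
  -- the sorted union of the two key sets IS the merge U of the two sorted key lists
  have hUperm : (U bare (counted.map Prod.fst)).Perm
      (PySem.Set.update (PySem.Set.update (PySem.Set.empty : PySem.Set String) gd.keys) dd.keys) := by
    refine (List.perm_ext_iff_of_nodup
      ((pairwise_U _ _ hbP hcP).imp (fun h => ne_of_lt h))
      (PySem.Set.nodup_update _ _ (PySem.Set.nodup_update _ _ List.nodup_nil))).mpr ?_
    intro x
    simp only [mem_U, PySem.Set.mem_update, List.not_mem_nil, false_or,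
      hbperm.mem_iff, hckperm.mem_iff]
  have hsorted : PySem.List.sorted
      (PySem.Set.update (PySem.Set.update (PySem.Set.empty : PySem.Set String) gd.keys) dd.keys)
      (fun x => x) false = U bare (counted.map Prod.fst) :=
    PySem.List.sorted_eq_of_perm_of_pairwise_lt _ _ (fun x => x) hUperm (pairwise_U _ _ hbP hcP)
  rw [foldl_append_ite (fun t => ¬ g.isEmpty ∧ gd.contains t)
        (fun t => t) (fun t => fmtFrag t (dd.getD t 0)), List.nil_append, hsorted]
  -- the per-key rendering functions agree, so the map equals the merge
  refine congrArg (PySem.Str.join ", ") ((merge_eq_map _ bare counted hbP hcP ?_ ?_).symm)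
  · intro t ht
    have htg : t ∈ gd.keys := hbperm.mem_iff.mp ht
    have hgne : ¬ g.isEmpty := by
      cases g with
      | nil => simp [hgd] at htg; cases htg
      | cons a l => simp
    rw [if_pos ⟨hgne, (PySem.Dict.contains_iff_mem_keys gd t).mpr htg⟩]
  · intro p hp hnot
    have hng : ¬ gd.contains p.1 := fun hc =>
      hnot (hbperm.mem_iff.mpr ((PySem.Dict.contains_iff_mem_keys gd p.1).mp hc))
    rw [if_neg (fun h => hng h.2)]
    have hpi : p ∈ dd.items := hcperm.mem_iff.mp hp
    have : dd.getD p.1 0 = p.2 := by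
      obtain ⟨k, v⟩ := p
      exact PySem.Dict.getD_of_mem_items dd hpi (PySem.Dict.nodup_keys_ofList d) 0
    rw [this]

-- ===== VERDICT (by name: the statement is the Claim_ definition above) =====
theorem format_relation_types_spec : Claim_equal_format_relation_types := by
  intro g d _hdom
  unfold Spec_format_relation_types
  exact format_A_eq_alt g d
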